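-- pv_equiv track=rewrite | github.com/MajoorWaldi/ComfyUI-Majoor-AssetsManager | mjr_am_backend/features/metadata/extractors.py | _split_tags
-- ===== SOURCE A (Python) =====
-- MAX_TAG_LENGTH = 100
--
-- def _split_tags(text: str) -> list[str]:
--     raw = str(text or "").strip()
--     if not raw:
--         return []
--     # Common separators: semicolon (Windows), comma (many tools), pipe/newlines.
--     parts = []
--     for chunk in raw.replace("\r", "\n").replace("|", ";").split("\n"):
--         parts.extend(chunk.split(";"))
--     out: list[str] = []
--     seen = set()
--     for p in parts:
--         for t in p.split(","):
--             tag = str(t).strip()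
--             if not tag:
--                 continue
--             if tag in seen:
--                 continue
--             if len(tag) > MAX_TAG_LENGTH:
--                 continue
--             seen.add(tag)
--             out.append(tag)
--     return out
-- ===== SOURCE B (Python) =====
-- MAX_TAG_LENGTH = 100
-- _SEPARATORS = "\r\n|;,"
--
-- def _split_tags(text: str) -> list[str]:
--     # one character-level pass: accumulate a buffer, flush it at every separator
--     out: list[str] = []
--     seen = set()
--     buf: list[str] = []
--     for ch in str(text or "") + "\n":
--         if ch in _SEPARATORS:
--             tag = "".join(buf).strip()
--             buf = []
--             if tag and tag not in seen and len(tag) <= MAX_TAG_LENGTH: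
--                 seen.add(tag)
--                 out.append(tag)
--         else:
--             buf.append(ch)
--     return out
-- ===== Notes on version B (the rewrite author's own statement) =====
-- stated objective: simpler
-- what changed: Replaces the staged replace/split cascade (replace \r->\n, |->;, split on \n, then ;, then ,) plus a nested dedup loop with one character-level pass that accumulates a buffer and flushes a stripped, deduplicated, length-checked tag at every separator.
import Mathlib
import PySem

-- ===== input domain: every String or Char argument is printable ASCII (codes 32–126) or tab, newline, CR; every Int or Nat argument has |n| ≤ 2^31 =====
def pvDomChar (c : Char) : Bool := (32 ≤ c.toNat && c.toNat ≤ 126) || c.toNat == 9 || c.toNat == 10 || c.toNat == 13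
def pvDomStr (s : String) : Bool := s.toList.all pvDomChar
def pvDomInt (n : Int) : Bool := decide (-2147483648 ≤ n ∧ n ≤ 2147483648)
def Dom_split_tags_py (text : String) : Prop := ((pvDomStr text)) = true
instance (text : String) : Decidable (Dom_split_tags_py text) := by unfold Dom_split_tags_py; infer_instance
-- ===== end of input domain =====

-- B replaces A's staged replace/split cascade with a single character-level pass that
-- flushes a buffer at every separator; same return value, no speed claim (objective: simpler).

-- s.split(sep) for a non-empty separator (split? is some exactly when sep ≠ ""); exact
def pySplit (s sep : String) : List String := (PySem.Str.split? s sep).getD []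

-- ===== PORT A =====
def split_tags_py (text : String) : List String :=
  let raw := PySem.Str.strip (if text == "" then "" else text)
  if raw == "" then []
  else
    let parts := (pySplit (PySem.Str.replace (PySem.Str.replace raw "\r" "\n") "|" ";") "\n").foldl
        (fun parts chunk => parts ++ pySplit chunk ";") []
    (parts.foldl
      (fun (st : List String × PySem.Set String) p =>
        (pySplit p ",").foldl
          (fun (st : List String × PySem.Set String) t =>
            let tag := PySem.Str.strip t
            if tag == "" then st
            else if st.2.contains tag then st
            else if 100 < PySem.Str.len tag then st
            else (st.1 ++ [tag], st.2.add tag)) st)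
      ([], PySem.Set.ofList [])).1

-- ===== PORT B =====
def split_tags_py_alt (text : String) : List String :=
  let seps : List Char := ['\r', '\n', '|', ';', ',']
  (((if text == "" then "" else text).toList ++ ['\n']).foldl
    (fun (st : List String × PySem.Set String × List Char) ch =>
      if seps.contains ch then
        let tag := PySem.Str.strip (String.ofList st.2.2)
        if !(tag == "") && !st.2.1.contains tag && decide (PySem.Str.len tag ≤ 100) then
          (st.1 ++ [tag], st.2.1.add tag, [])
        else (st.1, st.2.1, [])
      else (st.1, st.2.1, st.2.2 ++ [ch]))
    ([], PySem.Set.ofList [], [])).1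

-- ===== PRECONDITION & SPEC =====
def Spec_split_tags_py (text : String) (out : List String) : Prop := out = split_tags_py_alt text
instance (text : String) (out : List String) : Decidable (Spec_split_tags_py text out) := by unfold Spec_split_tags_py; infer_instance

-- ===== CLAIM (what is proved, stated in full; the proofs are below) =====
def Claim_equal_split_tags_py : Prop := ∀ (text : String), Dom_split_tags_py text → Spec_split_tags_py text (split_tags_py text)

-- ===== LEMMAS AND PROOFS =====

-- split on a boolean predicate over the characters (the common tokenizer both ports reduce to)
def splitP (p : Char → Bool) : List Char → List (List Char)
  | [] => [[]]
  | c :: cs => if p c then [] :: splitP p cs else (splitP p cs).modifyHead (c :: ·)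

-- update the last element of a (nonempty) list
def upLast (f : List Char → List Char) : List (List Char) → List (List Char)
  | [] => []
  | [x] => [f x]
  | x :: y :: xs => x :: upLast f (y :: xs)

-- the shared flush step on a raw (unstripped) token
def flushF (st : List String × PySem.Set String) (tok : List Char) : List String × PySem.Set String :=
  let tag := PySem.Str.strip (String.ofList tok)
  if tag == "" then st
  else if st.2.contains tag then st
  else if 100 < PySem.Str.len tag then st
  else (st.1 ++ [tag], st.2.add tag)

-- flush for an already-stripped, nonempty token
def flushG (st : List String × PySem.Set String) (tok : List Char) : List String × PySem.Set String :=
  let tag := String.ofList tok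
  if st.2.contains tag then st
  else if 100 < PySem.Str.len tag then st
  else (st.1 ++ [tag], st.2.add tag)

def normTok (ts : List (List Char)) : List (List Char) :=
  (ts.map PySem.Chars.strip).filter (fun t => !t.isEmpty)

theorem splitP_ne_nil (p : Char → Bool) (cs : List Char) : splitP p cs ≠ [] := by
  induction cs with
  | nil => simp [splitP]
  | cons c cs ih =>
    simp only [splitP]
    split
    · simp
    · rcases h : splitP p cs with _ | ⟨x, xs⟩
      · exact absurd h ih
      · simp [List.modifyHead]

theorem replace_go_single (a b : Char) :
    ∀ (fuel : Nat) (l acc : List Char), l.length ≤ fuel →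
      PySem.Chars.replace.go [a] [b] fuel l acc
        = acc.reverse ++ l.map (fun c => if c == a then b else c) := by
  intro fuel
  induction fuel with
  | zero =>
    intro l acc h
    have hl : l = [] := List.eq_nil_of_length_eq_zero (Nat.le_zero.mp h)
    subst hl
    rw [PySem.Chars.replace.go.eq_def]
    simp
  | succ n ih =>
    intro l acc h
    cases l with
    | nil => rw [PySem.Chars.replace.go.eq_def]; simp
    | cons c t =>
      rw [PySem.Chars.replace.go.eq_def]
      have ht : t.length ≤ n := by simpa using h
      have hpre : ([a].isPrefixOf (c :: t)) = (a == c) := by simp [List.isPrefixOf]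
      simp only [hpre]
      by_cases hc : (a == c) = true
      · rw [if_pos hc]
        simp only [List.length_cons, List.length_nil, List.drop_succ_cons, List.drop_zero]
        rw [ih t _ ht]
        have hca : (c == a) = true := by simpa [BEq.comm] using hc
        rw [List.map_cons, if_pos hca]
        simp
      · rw [if_neg hc]
        rw [ih t _ ht]
        have hca : (c == a) = false := by
          cases h2 : c == a
          · rfl
          · exact absurd (by simpa [BEq.comm] using h2) hc
        rw [List.map_cons, if_neg (by simp [hca])]
        simp

theorem replace_single (a b : Char) (cs : List Char) :
    PySem.Chars.replace cs [a] [b] = cs.map (fun c => if c == a then b else c) := by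
  have h := replace_go_single a b cs.length cs [] le_rfl
  simpa [PySem.Chars.replace] using h

theorem splitOn_go_single (a : Char) :
    ∀ (fuel : Nat) (l cur : List Char) (acc : List (List Char)), l.length < fuel →
      PySem.Chars.splitOn.go [a] fuel l cur acc
        = acc.reverse ++ (splitP (· == a) l).modifyHead (cur.reverse ++ ·) := by
  intro fuel
  induction fuel with
  | zero => intro l cur acc h; exact absurd h (by omega)
  | succ n ih =>
    intro l cur acc h
    cases l with
    | nil =>
      rw [PySem.Chars.splitOn.go.eq_def]
      simp [splitP, List.modifyHead]
    | cons c t =>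
      rw [PySem.Chars.splitOn.go.eq_def]
      have ht : t.length < n := by simpa using h
      have hpre : ([a].isPrefixOf (c :: t)) = (a == c) := by simp [List.isPrefixOf]
      simp only [hpre]
      by_cases hc : (a == c) = true
      · rw [if_pos hc]
        simp only [List.length_cons, List.length_nil, List.drop_succ_cons, List.drop_zero]
        rw [ih t [] _ ht]
        have hca : (c == a) = true := by simpa [BEq.comm] using hc
        have hsp : splitP (· == a) (c :: t) = [] :: splitP (· == a) t := by
          simp [splitP, hca]
        rw [hsp]
        rcases hs : splitP (· == a) t with _ | ⟨x, xs⟩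
        · exact absurd hs (splitP_ne_nil _ _)
        · simp [List.modifyHead]
      · rw [if_neg hc]
        rw [ih t (c :: cur) acc ht]
        have hca : (c == a) = false := by
          cases h2 : c == a
          · rfl
          · exact absurd (by simpa [BEq.comm] using h2) hc
        have hsp : splitP (· == a) (c :: t) = List.modifyHead (c :: ·) (splitP (· == a) t) := by
          simp [splitP, hca]
        rw [hsp]
        rcases hs : splitP (· == a) t with _ | ⟨x, xs⟩
        · exact absurd hs (splitP_ne_nil _ _)
        · simp [List.modifyHead, List.append_assoc]

theorem splitOn_single (a : Char) (cs : List Char) :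
    PySem.Chars.splitOn cs [a] = splitP (· == a) cs := by
  rw [PySem.Chars.splitOn]
  rw [splitOn_go_single a (cs.length + 1) cs [] [] (by omega)]
  rcases hs : splitP (· == a) cs with _ | ⟨x, xs⟩
  · exact absurd hs (splitP_ne_nil _ _)
  · simp [List.modifyHead]

theorem pySplit_single (s : String) (a : Char) (sep : String) (hsep : sep.toList = [a]) :
    pySplit s sep = (splitP (· == a) s.toList).map String.ofList := by
  rw [pySplit, PySem.Str.split?, hsep]
  simp [PySem.Chars.split?, splitOn_single]

theorem splitP_flatMap (p q : Char → Bool) (cs : List Char) :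
    (splitP p cs).flatMap (splitP q) = splitP (fun c => p c || q c) cs := by
  induction cs with
  | nil => simp [splitP]
  | cons c cs ih =>
    rcases hs : splitP p cs with _ | ⟨h, t⟩
    · exact absurd hs (splitP_ne_nil _ _)
    · by_cases hp : p c
      · simp [splitP, hp, ih]
      · have hrw : splitP p (c :: cs) = (c :: h) :: t := by
          simp [splitP, hp, hs, List.modifyHead]
        rw [hrw, List.flatMap_cons]
        have ihr : splitP q h ++ List.flatMap (splitP q) t = splitP (fun c => p c || q c) cs := by
          rw [← ih, hs, List.flatMap_cons]
        by_cases hq : q c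
        · have e1 : splitP q (c :: h) = [] :: splitP q h := by simp [splitP, hq]
          have e2 : splitP (fun c => p c || q c) (c :: cs) = [] :: splitP (fun c => p c || q c) cs := by
            simp [splitP, hp, hq]
          rw [e1, e2, ← ihr]
          simp
        · rcases hqh : splitP q h with _ | ⟨y, ys⟩
          · exact absurd hqh (splitP_ne_nil _ _)
          · have e1 : splitP q (c :: h) = (c :: y) :: ys := by
              simp [splitP, hq, hqh, List.modifyHead]
            have e2 : splitP (fun c => p c || q c) (c :: cs)
                = List.modifyHead (c :: ·) (splitP (fun c => p c || q c) cs) := by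
              simp [splitP, hp, hq]
            rw [e1, e2, ← ihr, hqh]
            simp [List.modifyHead]

theorem splitP_map (f : Char → Char) (p q : Char → Bool) (cs : List Char)
    (h1 : ∀ c, p (f c) = q c) (h2 : ∀ c, q c = false → f c = c) :
    splitP p (cs.map f) = splitP q cs := by
  induction cs with
  | nil => simp [splitP]
  | cons c cs ih =>
    simp only [List.map_cons, splitP, h1 c]
    by_cases hq : q c
    · simp [hq, ih]
    · have : f c = c := h2 c (by simpa using hq)
      simp [hq, this, ih]

theorem splitP_snoc (p : Char → Bool) (xs : List Char) (c : Char) :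
    splitP p (xs ++ [c])
      = if p c then splitP p xs ++ [[]] else upLast (· ++ [c]) (splitP p xs) := by
  induction xs with
  | nil =>
    by_cases hc : p c
    · simp [splitP, hc, List.modifyHead]
    · simp [splitP, hc, List.modifyHead, upLast]
  | cons x xs ih =>
    by_cases hx : p x
    · simp only [List.cons_append, splitP, hx, if_pos, ih]
      by_cases hc : p c
      · simp [hc]
      · simp only [hc, Bool.false_eq_true, if_neg]
        rcases hs : splitP p xs with _ | ⟨h, t⟩
        · exact absurd hs (splitP_ne_nil _ _)
        · simp [upLast]
    · simp only [List.cons_append, splitP, hx, Bool.false_eq_true, if_neg, ih]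
      by_cases hc : p c
      · simp only [hc, if_pos]
        rcases hs : splitP p xs with _ | ⟨h, t⟩
        · exact absurd hs (splitP_ne_nil _ _)
        · simp [List.modifyHead]
      · simp only [hc, Bool.false_eq_true, if_neg]
        rcases hs : splitP p xs with _ | ⟨h, t⟩
        · exact absurd hs (splitP_ne_nil _ _)
        · cases t with
          | nil => simp [upLast, List.modifyHead]
          | cons y ys => simp [upLast, List.modifyHead]

theorem strip_cons_ws (c : Char) (t : List Char) (h : PySem.Chars.isspace c = true) :
    PySem.Chars.strip (c :: t) = PySem.Chars.strip t := by
  simp [PySem.Chars.strip, PySem.Chars.lstrip, List.dropWhile_cons, h]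

theorem rstrip_snoc_ws (c : Char) (t : List Char) (h : PySem.Chars.isspace c = true) :
    PySem.Chars.rstrip (t ++ [c]) = PySem.Chars.rstrip t := by
  simp [PySem.Chars.rstrip, List.reverse_append, List.dropWhile_cons, h]

theorem rstrip_snoc_nonws (c : Char) (t : List Char) (h : PySem.Chars.isspace c = false) :
    PySem.Chars.rstrip (t ++ [c]) = t ++ [c] := by
  simp [PySem.Chars.rstrip, List.reverse_append, List.dropWhile_cons, h]

theorem strip_snoc_ws (c : Char) (t : List Char) (h : PySem.Chars.isspace c = true) :
    PySem.Chars.strip (t ++ [c]) = PySem.Chars.strip t := by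
  simp only [PySem.Chars.strip, PySem.Chars.lstrip, List.dropWhile_append]
  split
  · next he =>
    have h1 : List.dropWhile PySem.Chars.isspace [c] = [] := by simp [List.dropWhile, h]
    have h2 : List.dropWhile PySem.Chars.isspace t = [] := by
      simpa [List.isEmpty_iff] using he
    rw [h1, h2]
  · exact rstrip_snoc_ws c _ h

theorem ofList_eq_empty_iff (l : List Char) : (String.ofList l = "") ↔ l = [] := by
  constructor
  · intro h
    have := congrArg String.toList h
    simpa using this
  · rintro rfl
    rfl

theorem strip_ofList (t : List Char) :
    PySem.Str.strip (String.ofList t) = String.ofList (PySem.Chars.strip t) := by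
  simp [PySem.Str.strip]

theorem flushF_eq (st : List String × PySem.Set String) (t : List Char) :
    flushF st t
      = if (PySem.Chars.strip t).isEmpty then st else flushG st (PySem.Chars.strip t) := by
  unfold flushF flushG
  rw [strip_ofList]
  by_cases h : PySem.Chars.strip t = []
  · simp [h, ofList_eq_empty_iff]
  · have h1 : (String.ofList (PySem.Chars.strip t) == "") = false := by
      simp [ofList_eq_empty_iff, h]
    simp [h1, List.isEmpty_iff, h]

theorem normTok_cons (t : List Char) (ts : List (List Char)) :
    normTok (t :: ts)
      = if (PySem.Chars.strip t).isEmpty then normTok ts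
        else PySem.Chars.strip t :: normTok ts := by
  simp only [normTok, List.map_cons, List.filter_cons]
  cases h : (PySem.Chars.strip t).isEmpty <;> simp [h]

theorem fold_flush_norm (ts : List (List Char)) (st : List String × PySem.Set String) :
    ts.foldl flushF st = (normTok ts).foldl flushG st := by
  induction ts generalizing st with
  | nil => simp [normTok]
  | cons t ts ih =>
    rw [List.foldl_cons, flushF_eq, normTok_cons]
    cases h : (PySem.Chars.strip t).isEmpty <;> simp [h, ih]

theorem normTok_cons_ws (p : Char → Bool) (c : Char) (cs : List Char)
    (h : PySem.Chars.isspace c = true) :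
    normTok (splitP p (c :: cs)) = normTok (splitP p cs) := by
  by_cases hp : p c
  · have e : splitP p (c :: cs) = [] :: splitP p cs := by simp [splitP, hp]
    rw [e, normTok_cons]
    simp [PySem.Chars.strip, PySem.Chars.lstrip, PySem.Chars.rstrip]
  · rcases hs : splitP p cs with _ | ⟨x, xs⟩
    · exact absurd hs (splitP_ne_nil _ _)
    · have e : splitP p (c :: cs) = (c :: x) :: xs := by
        simp [splitP, hp, hs, List.modifyHead]
      rw [e, normTok_cons, normTok_cons, strip_cons_ws c x h]

theorem normTok_lstrip (p : Char → Bool) (cs : List Char) :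
    normTok (splitP p (PySem.Chars.lstrip cs)) = normTok (splitP p cs) := by
  induction cs with
  | nil => simp [PySem.Chars.lstrip]
  | cons c cs ih =>
    cases hw : PySem.Chars.isspace c
    · have e : PySem.Chars.lstrip (c :: cs) = c :: cs := by
        simp [PySem.Chars.lstrip, List.dropWhile_cons, hw]
      rw [e]
    · have e : PySem.Chars.lstrip (c :: cs) = PySem.Chars.lstrip cs := by
        simp [PySem.Chars.lstrip, List.dropWhile_cons, hw]
      rw [e, ih]
      exact (normTok_cons_ws p c cs hw).symm

theorem map_strip_upLast (c : Char) (h : PySem.Chars.isspace c = true) :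
    ∀ ts : List (List Char),
      (upLast (· ++ [c]) ts).map PySem.Chars.strip = ts.map PySem.Chars.strip
  | [] => rfl
  | [x] => by simp [upLast, strip_snoc_ws c x h]
  | x :: y :: ys => by
    simp only [upLast, List.map_cons, map_strip_upLast c h (y :: ys)]

theorem normTok_rstrip (p : Char → Bool) (cs : List Char) :
    normTok (splitP p (PySem.Chars.rstrip cs)) = normTok (splitP p cs) := by
  induction cs using List.reverseRecOn with
  | nil => simp [PySem.Chars.rstrip]
  | append_singleton xs c ih =>
    cases hw : PySem.Chars.isspace c
    · rw [rstrip_snoc_nonws c xs hw]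
    · rw [rstrip_snoc_ws c xs hw, ih, splitP_snoc]
      by_cases hc : p c
      · rw [if_pos hc]
        simp [normTok, List.filter_append, PySem.Chars.strip, PySem.Chars.lstrip,
          PySem.Chars.rstrip]
      · rw [if_neg hc]
        unfold normTok
        rw [map_strip_upLast c hw]

theorem normTok_strip (p : Char → Bool) (cs : List Char) :
    normTok (splitP p (PySem.Chars.strip cs)) = normTok (splitP p cs) := by
  have e : PySem.Chars.strip cs = PySem.Chars.rstrip (PySem.Chars.lstrip cs) := rfl
  rw [e, normTok_rstrip, normTok_lstrip]

-- the full separator predicate (A side, after the two single-char replaces)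
def qFull (c : Char) : Bool := ((c == '\n' || c == ';') || c == ',') || (c == '\r' || c == '|')

theorem sepB_eq_qFull (c : Char) :
    (['\r', '\n', '|', ';', ','].contains c) = qFull c := by
  simp only [List.contains_cons, List.contains_nil, qFull]
  cases h1 : c == '\r' <;> cases h2 : c == '\n' <;> cases h3 : c == '|' <;>
    cases h4 : c == ';' <;> cases h5 : c == ',' <;>
    simp only [h1, h2, h3, h4, h5, Bool.or_false, Bool.false_or, Bool.or_true, Bool.true_or]

def fRN (c : Char) : Char := if c == '\r' then '\n' else c
def fPS (c : Char) : Char := if c == '|' then ';' else c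

theorem pA_comp (c : Char) :
    ((fPS (fRN c) == '\n' || fPS (fRN c) == ';') || fPS (fRN c) == ',') = qFull c := by
  by_cases h1 : c = '\r'
  · subst h1; decide
  by_cases h2 : c = '|'
  · subst h2; decide
  have e1 : fRN c = c := by simp [fRN, h1]
  have e2 : fPS c = c := by simp [fPS, h2]
  rw [e1, e2]
  simp [qFull, h1, h2]

theorem qFull_false_fix (c : Char) (h : qFull c = false) : fPS (fRN c) = c := by
  simp only [qFull, Bool.or_eq_false_iff] at h
  simp [fRN, fPS, h.1.1.1, h.1.1.2, h.1.2, h.2.1, h.2.2]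

def bstep (st : List String × PySem.Set String × List Char) (ch : Char) :
    List String × PySem.Set String × List Char :=
  if (['\r', '\n', '|', ';', ','] : List Char).contains ch then
    let tag := PySem.Str.strip (String.ofList st.2.2)
    if !(tag == "") && !st.2.1.contains tag && decide (PySem.Str.len tag ≤ 100) then
      (st.1 ++ [tag], st.2.1.add tag, [])
    else (st.1, st.2.1, [])
  else (st.1, st.2.1, st.2.2 ++ [ch])

theorem bstep_sep (c : Char) (hc : (['\r', '\n', '|', ';', ','] : List Char).contains c = true)
    (out : List String) (seen : PySem.Set String) (buf : List Char) :
    bstep (out, seen, buf) c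
      = ((flushF (out, seen) buf).1, (flushF (out, seen) buf).2, []) := by
  simp only [bstep, if_pos hc, flushF]
  by_cases h1 : PySem.Str.strip (String.ofList buf) == ""
  · simp [h1]
  · by_cases h2 : PySem.Str.strip (String.ofList buf) ∈ seen
    · simp [h1, h2]
    · by_cases h3 : (PySem.Chars.strip buf).length ≤ 100
      · have h4 : ¬ 100 < (PySem.Chars.strip buf).length := by omega
        simp [h1, h2, h3, h4]
      · have h4 : 100 < (PySem.Chars.strip buf).length := by omega
        simp [h1, h2, h3, h4]

theorem bstep_nonsep (c : Char) (hc : (['\r', '\n', '|', ';', ','] : List Char).contains c = false)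
    (out : List String) (seen : PySem.Set String) (buf : List Char) :
    bstep (out, seen, buf) c = (out, seen, buf ++ [c]) := by
  unfold bstep
  rw [if_neg (by rw [hc]; exact Bool.false_ne_true)]

theorem bfold : ∀ (cs buf : List Char) (out : List String) (seen : PySem.Set String),
    (cs ++ ['\n']).foldl bstep (out, seen, buf)
      = ((((splitP qFull cs).modifyHead (buf ++ ·)).foldl flushF (out, seen)).1,
         (((splitP qFull cs).modifyHead (buf ++ ·)).foldl flushF (out, seen)).2, [])
  | [], buf, out, seen => by
    rw [List.nil_append, List.foldl_cons, List.foldl_nil, bstep_sep '\n' (by decide)]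
    simp [splitP, List.modifyHead]
  | c :: cs, buf, out, seen => by
    cases hc : (['\r', '\n', '|', ';', ','] : List Char).contains c
    · have hq : qFull c = false := by rw [← sepB_eq_qFull]; exact hc
      rw [List.cons_append, List.foldl_cons, bstep_nonsep c hc]
      rw [bfold cs (buf ++ [c]) out seen]
      have e : splitP qFull (c :: cs) = List.modifyHead (c :: ·) (splitP qFull cs) := by
        simp [splitP, hq]
      have hfun : (fun t => (buf ++ [c]) ++ t) = ((fun t => buf ++ t) ∘ (c :: ·)) := by
        funext t; simp
      rw [e, List.modifyHead_modifyHead, hfun]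
    · have hq : qFull c = true := by rw [← sepB_eq_qFull]; exact hc
      rw [List.cons_append, List.foldl_cons, bstep_sep c hc]
      rw [bfold cs [] (flushF (out, seen) buf).1 (flushF (out, seen) buf).2]
      have e : splitP qFull (c :: cs) = [] :: splitP qFull cs := by simp [splitP, hq]
      have hid : (fun t : List Char => [] ++ t) = id := by funext t; simp
      rw [e, hid, List.modifyHead_id]
      rcases hs : splitP qFull cs with _ | ⟨x, xs⟩
      · exact absurd hs (splitP_ne_nil _ _)
      · simp [List.modifyHead]

theorem text_or (text : String) : (if text == "" then "" else text) = text := by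
  split
  · next h => exact (eq_of_beq h).symm
  · rfl

theorem A_parts (X : List (List Char)) (acc : List String) :
    (X.map String.ofList).foldl (fun parts chunk => parts ++ pySplit chunk ";") acc
      = acc ++ (X.flatMap (splitP (· == ';'))).map String.ofList := by
  induction X generalizing acc with
  | nil => simp
  | cons h t ih =>
    rw [List.map_cons, List.foldl_cons, ih]
    have e : pySplit (String.ofList h) ";" = (splitP (· == ';') h).map String.ofList := by
      rw [pySplit_single _ ';' ";" rfl, String.toList_ofList]
    rw [e, List.flatMap_cons, List.map_append, List.append_assoc]

theorem A_fold (X : List (List Char)) (st : List String × PySem.Set String) :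
    (X.map String.ofList).foldl
      (fun st p =>
        (pySplit p ",").foldl
          (fun (st : List String × PySem.Set String) t =>
            let tag := PySem.Str.strip t
            if tag == "" then st
            else if st.2.contains tag then st
            else if 100 < PySem.Str.len tag then st
            else (st.1 ++ [tag], st.2.add tag)) st) st
      = (X.flatMap (splitP (· == ','))).foldl flushF st := by
  induction X generalizing st with
  | nil => simp
  | cons h t ih =>
    rw [List.map_cons, List.foldl_cons, ih, List.flatMap_cons, List.foldl_append]
    congr 1
    have e : pySplit (String.ofList h) "," = (splitP (· == ',') h).map String.ofList := by
      rw [pySplit_single _ ',' "," rfl, String.toList_ofList]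
    rw [e, List.foldl_map]
    rfl

theorem tokensA (M0 : List Char) :
    ((splitP (· == '\n') (M0.map (fun c => fPS (fRN c)))).flatMap
        (splitP (· == ';'))).flatMap (splitP (· == ','))
      = splitP qFull M0 := by
  rw [splitP_flatMap, splitP_flatMap]
  exact splitP_map (fun c => fPS (fRN c)) _ qFull M0 (fun c => pA_comp c) qFull_false_fix

theorem portA_char (text : String) :
    split_tags_py text
      = if PySem.Chars.strip text.toList = [] then []
        else ((splitP qFull (PySem.Chars.strip text.toList)).foldl flushF
          ([], PySem.Set.ofList [])).1 := by
  simp only [split_tags_py, text_or]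
  by_cases he : PySem.Str.strip text == ""
  · have h0 : PySem.Chars.strip text.toList = [] := by
      have := congrArg String.toList (eq_of_beq he)
      simpa [PySem.Str.toList_strip] using this
    rw [if_pos he, if_pos h0]
  · have h0 : ¬ PySem.Chars.strip text.toList = [] := by
      intro h
      apply he
      have e : PySem.Str.strip text = "" := by rw [PySem.Str.strip, h]
      rw [e]
      rfl
    rw [if_neg he, if_neg h0]
    have hs2 : (PySem.Str.replace (PySem.Str.replace (PySem.Str.strip text) "\r" "\n") "|" ";").toList
        = (PySem.Chars.strip text.toList).map (fun c => fPS (fRN c)) := by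
      rw [PySem.Str.toList_replace, PySem.Str.toList_replace, PySem.Str.toList_strip]
      rw [show ("\r".toList) = ['\r'] from rfl, show ("\n".toList) = ['\n'] from rfl,
        show ("|".toList) = ['|'] from rfl, show (";".toList) = [';'] from rfl]
      rw [replace_single, replace_single, List.map_map]
      rfl
    have hpieces : pySplit (PySem.Str.replace (PySem.Str.replace (PySem.Str.strip text) "\r" "\n") "|" ";") "\n"
        = (splitP (· == '\n') ((PySem.Chars.strip text.toList).map (fun c => fPS (fRN c)))).map String.ofList := by
      rw [pySplit_single _ '\n' "\n" rfl, hs2]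
    rw [hpieces, A_parts, List.nil_append, A_fold, tokensA]

theorem portB_char (text : String) :
    split_tags_py_alt text
      = ((splitP qFull text.toList).foldl flushF ([], PySem.Set.ofList [])).1 := by
  have e : split_tags_py_alt text
      = (((if text == "" then "" else text).toList ++ ['\n']).foldl bstep
          ([], PySem.Set.ofList [], [])).1 := rfl
  rw [e, text_or, bfold]
  have hid : (fun t : List Char => [] ++ t) = id := by funext t; simp
  rw [hid, List.modifyHead_id]
  rfl

-- ===== VERDICT (by name: the statement is the Claim_ definition above) =====
theorem split_tags_py_spec : Claim_equal_split_tags_py := by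
  intro text _
  show split_tags_py text = split_tags_py_alt text
  rw [portA_char, portB_char]
  by_cases h : PySem.Chars.strip text.toList = []
  · rw [if_pos h, fold_flush_norm, ← normTok_strip qFull text.toList, h]
    simp [splitP, normTok, PySem.Chars.strip, PySem.Chars.lstrip, PySem.Chars.rstrip]
  · rw [if_neg h, fold_flush_norm, fold_flush_norm, normTok_strip]
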